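-- pv_equiv track=rewrite | github.com/mkryvets/alg-data-struct | array-matrix-algorithms/array_algorithms.py | sort_max_center
-- ===== SOURCE A (Python) =====
-- def max_element(arr):
--     max_el = arr[0]
--     max_el_index = 0
--     for i in range(len(arr)):
--         if arr[i] > max_el:
--             max_el = arr[i]
--             max_el_index = i
--     return max_el, max_el_index
--
-- def sort_max_center(arr):
--     result_arr = [0] * len(arr)
--     temp_arr = []
--     for el in arr:
--         temp_arr.append(el)
--     if len(arr) % 2 == 1:
--         center_index = int(len(arr) / 2)
--         max_el = max_element(temp_arr)
--         result_arr[center_index] = max_el[0]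
--         del temp_arr[max_el[1]]
--         boundary = center_index + 1
--         for i in range(1, boundary):
--             max_el_left = max_element(temp_arr)
--             result_arr[center_index - i] = max_el_left[0]
--             del temp_arr[max_el_left[1]]
--             max_el_right = max_element(temp_arr)
--             result_arr[center_index + i] = max_el_right[0]
--             del temp_arr[max_el_right[1]]
--     else:
--         left_center_index = int((len(arr) / 2)) - 1
--         right_center_index = int(len(arr) / 2)
--         boundary = int(len(arr) / 2)
--         for i in range(0, boundary):
--             max_el_left = max_element(temp_arr)
--             result_arr[left_center_index - i] = max_el_left[0]
--             del temp_arr[max_el_left[1]]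
--             max_el_right = max_element(temp_arr)
--             result_arr[right_center_index + i] = max_el_right[0]
--             del temp_arr[max_el_right[1]]
--     return result_arr
-- ===== SOURCE B (Python) =====
-- def sort_max_center(arr):
--     # Sort descending once, then split by index parity: elements at indices of the
--     # same parity as len(arr) go to the left of center (reversed), the rest to the right.
--     s = sorted(arr, reverse=True)
--     par = len(arr) % 2
--     left, right = [], []
--     for i, v in enumerate(s):
--         if i % 2 == par:
--             left.append(v)
--         else:
--             right.append(v)
--     return left[::-1] + right
-- ===== Notes on version B (the rewrite author's own statement) =====
-- stated objective: faster
-- what changed: A repeatedly scans the remaining list for its maximum and deletes it while filling the result center-out; B sorts descending once and splits the sorted list by index parity into the reversed left half and the right half.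
import Mathlib
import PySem

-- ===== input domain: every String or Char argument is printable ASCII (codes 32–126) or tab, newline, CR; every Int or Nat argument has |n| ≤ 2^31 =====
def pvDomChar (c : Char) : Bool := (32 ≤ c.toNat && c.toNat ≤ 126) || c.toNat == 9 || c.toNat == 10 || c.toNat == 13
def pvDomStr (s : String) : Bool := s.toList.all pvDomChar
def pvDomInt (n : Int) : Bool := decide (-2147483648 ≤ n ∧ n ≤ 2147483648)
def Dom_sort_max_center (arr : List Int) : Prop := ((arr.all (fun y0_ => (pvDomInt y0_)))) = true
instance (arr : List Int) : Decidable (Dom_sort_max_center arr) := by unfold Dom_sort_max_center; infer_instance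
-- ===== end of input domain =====

-- B replaces A's repeated select-the-maximum-and-delete scans by one descending sort
-- followed by an index-parity split placed around the center (objective: faster).

-- ===== PORT A =====
-- arr[0]/arr[i]: every call site inside sort_max_center passes a nonempty temp and
-- in-range indices, so the `.getD 0` default of pyGetD is never read there.
def max_element (arr : List Int) : Int × Int :=
  (PySem.List.pyRange 0 (arr.length : Int)).foldl
    (fun (st : Int × Int) i =>
      if PySem.List.pyGetD arr i 0 > st.1 then (PySem.List.pyGetD arr i 0, i) else st)
    (PySem.List.pyGetD arr 0 0, 0)

-- All assigned/deleted indices are provably nonnegative and in range at every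
-- iteration, so `.toNat` on them is exact (no Python negative-index wraparound occurs).
def sort_max_center (arr : List Int) : List Int :=
  let n := arr.length
  let result0 : List Int := List.replicate n 0
  let temp0 : List Int := arr.foldl (fun t el => t ++ [el]) []
  if n % 2 = 1 then
    let c : Int := (n : Int) / 2
    let me := max_element temp0
    let result1 := result0.set c.toNat me.1
    let temp1 := temp0.eraseIdx me.2.toNat
    let boundary : Int := c + 1
    ((PySem.List.pyRange 1 boundary).foldl
      (fun (st : List Int × List Int) i =>
        let ml := max_element st.2
        let r1 := st.1.set (c - i).toNat ml.1
        let t1 := st.2.eraseIdx ml.2.toNat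
        let mr := max_element t1
        let r2 := r1.set (c + i).toNat mr.1
        let t2 := t1.eraseIdx mr.2.toNat
        (r2, t2)) (result1, temp1)).1
  else
    let lc : Int := (n : Int) / 2 - 1
    let rc : Int := (n : Int) / 2
    let boundary : Int := (n : Int) / 2
    ((PySem.List.pyRange 0 boundary).foldl
      (fun (st : List Int × List Int) i =>
        let ml := max_element st.2
        let r1 := st.1.set (lc - i).toNat ml.1
        let t1 := st.2.eraseIdx ml.2.toNat
        let mr := max_element t1
        let r2 := r1.set (rc + i).toNat mr.1
        let t2 := t1.eraseIdx mr.2.toNat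
        (r2, t2)) (result0, temp0)).1

-- ===== PORT B =====
def sort_max_center_alt (arr : List Int) : List Int :=
  let s := PySem.List.sorted arr (fun x => x) true
  let par : Int := (arr.length : Int) % 2
  let lr := (PySem.List.enumerate s).foldl
    (fun (lr : List Int × List Int) iv =>
      if iv.1 % 2 = par then (lr.1 ++ [iv.2], lr.2) else (lr.1, lr.2 ++ [iv.2]))
    ([], [])
  lr.1.reverse ++ lr.2

-- ===== PRECONDITION & SPEC =====
def Spec_sort_max_center (arr : List Int) (out : List Int) : Prop := out = sort_max_center_alt arr
instance (arr : List Int) (out : List Int) : Decidable (Spec_sort_max_center arr out) := by unfold Spec_sort_max_center; infer_instance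

-- ===== CLAIM (what is proved, stated in full; the proofs are below) =====
def Claim_equal_sort_max_center : Prop := ∀ (arr : List Int), Dom_sort_max_center arr → Spec_sort_max_center arr (sort_max_center arr)

-- ===== LEMMAS AND PROOFS =====

theorem pv_foldl_app (arr acc : List Int) :
    arr.foldl (fun t el => t ++ [el]) acc = acc ++ arr := by
  induction arr generalizing acc with
  | nil => simp
  | cons a t ih => simp [List.foldl_cons, ih]

theorem max_element_spec (arr : List Int) (h : arr ≠ []) :
    ∃ j : Nat, (max_element arr).2 = (j : Int) ∧ j < arr.length ∧
      arr.getD j 0 = (max_element arr).1 ∧ ∀ x ∈ arr, x ≤ (max_element arr).1 := by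
  have hpos : 0 < arr.length := List.length_pos_of_ne_nil h
  have key : ∀ m : Nat, m ≤ arr.length →
      ∃ j : Nat,
        (((PySem.List.pyRange 0 (m : Int)).foldl
          (fun (st : Int × Int) i =>
            if PySem.List.pyGetD arr i 0 > st.1 then (PySem.List.pyGetD arr i 0, i) else st)
          (PySem.List.pyGetD arr 0 0, 0))).2 = (j : Int) ∧ j < arr.length ∧
        arr.getD j 0 = (((PySem.List.pyRange 0 (m : Int)).foldl
          (fun (st : Int × Int) i =>
            if PySem.List.pyGetD arr i 0 > st.1 then (PySem.List.pyGetD arr i 0, i) else st)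
          (PySem.List.pyGetD arr 0 0, 0))).1 ∧
        ∀ i : Nat, i < m → arr.getD i 0 ≤ (((PySem.List.pyRange 0 (m : Int)).foldl
          (fun (st : Int × Int) i =>
            if PySem.List.pyGetD arr i 0 > st.1 then (PySem.List.pyGetD arr i 0, i) else st)
          (PySem.List.pyGetD arr 0 0, 0))).1 := by
    intro m
    induction m with
    | zero =>
      intro _
      rw [show ((0 : Nat) : Int) = 0 by simp, PySem.List.pyRange_one_eq_nil le_rfl]
      refine ⟨0, by simp, hpos, ?_, by omega⟩
      · simp [List.foldl_nil]
        rw [show (0 : Int) = ((0 : Nat) : Int) by simp, PySem.List.pyGetD_natCast]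
        simp [List.getD]
    | succ m ih =>
      intro hm
      have hrange : PySem.List.pyRange 0 ((m + 1 : Nat) : Int) =
          PySem.List.pyRange 0 (m : Int) ++ [(m : Int)] := by
        push_cast
        exact PySem.List.pyRange_one_succ_right (by positivity)
      obtain ⟨j, hj2, hjlt, hjval, hall⟩ := ih (by omega)
      rw [hrange, List.foldl_append]
      set st := ((PySem.List.pyRange 0 (m : Int)).foldl
          (fun (st : Int × Int) i =>
            if PySem.List.pyGetD arr i 0 > st.1 then (PySem.List.pyGetD arr i 0, i) else st)
          (PySem.List.pyGetD arr 0 0, 0)) with hst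
      simp only [List.foldl_cons, List.foldl_nil]
      rw [PySem.List.pyGetD_natCast]
      by_cases hc : arr.getD m 0 > st.1
      · rw [if_pos hc]
        refine ⟨m, rfl, by omega, rfl, ?_⟩
        intro i hi
        rcases Nat.lt_or_ge i m with h' | h'
        · exact le_of_lt (lt_of_le_of_lt (hall i h') hc)
        · have : i = m := by omega
          simp [this]
      · rw [if_neg hc]
        refine ⟨j, hj2, hjlt, hjval, ?_⟩
        intro i hi
        rcases Nat.lt_or_ge i m with h' | h'
        · exact hall i h'
        · have : i = m := by omega
          subst this
          omega
  obtain ⟨j, hj2, hjlt, hjval, hall⟩ := key arr.length le_rfl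
  refine ⟨j, hj2, hjlt, hjval, ?_⟩
  intro x hx
  obtain ⟨i, hi, rfl⟩ := List.getElem_of_mem hx
  have := hall i hi
  rwa [List.getD_eq_getElem _ _ hi] at this

theorem max_element_idx_lt (arr : List Int) (h : arr ≠ []) :
    (max_element arr).2.toNat < arr.length := by
  obtain ⟨j, hj, hlt, -, -⟩ := max_element_spec arr h
  omega

def selAll (l : List Int) : List Int :=
  if h : l = [] then [] else
    (max_element l).1 :: selAll (l.eraseIdx (max_element l).2.toNat)
termination_by l.length
decreasing_by
  have h1 := max_element_idx_lt l h
  rw [List.length_eraseIdx, if_pos h1]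
  omega

theorem selAll_cons (l : List Int) (h : l ≠ []) :
    selAll l = (max_element l).1 :: selAll (l.eraseIdx (max_element l).2.toNat) := by
  conv_lhs => rw [selAll]
  simp [h]

theorem perm_cons_eraseIdx_max (l : List Int) (h : l ≠ []) :
    ((max_element l).1 :: l.eraseIdx (max_element l).2.toNat).Perm l := by
  obtain ⟨j, hj2, hjlt, hjval, -⟩ := max_element_spec l h
  have hnat : (max_element l).2.toNat = j := by omega
  rw [hnat, List.eraseIdx_eq_take_drop_succ]
  have hval : (max_element l).1 = l[j] := by
    rw [← hjval, List.getD_eq_getElem _ _ hjlt]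
  rw [hval]
  refine List.Perm.symm ?_
  have hsplit : l = l.take j ++ l[j] :: l.drop (j+1) := by
    rw [show l[j] :: l.drop (j+1) = l.drop j from List.getElem_cons_drop hjlt,
      List.take_append_drop]
  refine List.Perm.trans (List.Perm.of_eq hsplit) ?_
  exact List.perm_middle

theorem selAll_perm (l : List Int) : (selAll l).Perm l := by
  induction l using selAll.induct with
  | case1 => rw [show selAll [] = [] from by unfold selAll; simp]
  | case2 l hl ih =>
    rw [selAll_cons l hl]
    exact (List.Perm.cons _ ih).trans (perm_cons_eraseIdx_max l hl)

theorem selAll_length (l : List Int) : (selAll l).length = l.length :=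
  (selAll_perm l).length_eq

theorem selAll_pairwise (l : List Int) : (selAll l).Pairwise (fun a b => b ≤ a) := by
  induction l using selAll.induct with
  | case1 => rw [show selAll [] = [] from by unfold selAll; simp]; simp
  | case2 l hl ih =>
    rw [selAll_cons l hl]
    refine List.Pairwise.cons ?_ ih
    intro y hy
    obtain ⟨-, -, -, -, hmax⟩ := max_element_spec l hl
    exact hmax y (List.mem_of_mem_eraseIdx ((selAll_perm _).mem_iff.mp hy))

theorem selAll_eq_sorted (l : List Int) :
    selAll l = PySem.List.sorted l (fun x => x) true := by
  refine PySem.List.eq_of_perm_of_pairwise_le_of_injective (key := fun x : Int => -x)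
    neg_injective ((selAll_perm l).trans (PySem.List.sorted_perm l (fun x => x) true).symm) ?_ ?_
  · exact (selAll_pairwise l).imp (by intro a b hb; simp; omega)
  · exact (PySem.List.sorted_pairwise_rev l (fun x => x)).imp (by intro a b hb; simp; omega)

def parSplit : List Int → List Int × List Int
  | [] => ([], [])
  | a :: t => (a :: (parSplit t).2, (parSplit t).1)

theorem parSplit_len (l : List Int) :
    (parSplit l).1.length + (parSplit l).2.length = l.length := by
  induction l with
  | nil => simp [parSplit]
  | cons a t ih => simp [parSplit]; omega

theorem parSplit_append2 (m : List Int) (x y : Int) :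
    parSplit (m ++ [x, y]) =
      if m.length % 2 = 0 then ((parSplit m).1 ++ [x], (parSplit m).2 ++ [y])
      else ((parSplit m).1 ++ [y], (parSplit m).2 ++ [x]) := by
  induction m with
  | nil => simp [parSplit]
  | cons a t ih =>
    simp only [List.cons_append, parSplit, ih, List.length_cons]
    rcases Nat.even_or_odd t.length with he | ho
    · have h0 : t.length % 2 = 0 := Nat.even_iff.mp he
      have h1 : (t.length + 1) % 2 ≠ 0 := by omega
      simp [h0, h1]
    · have h0 : t.length % 2 ≠ 0 := by have := Nat.odd_iff.mp ho; omega
      have h1 : (t.length + 1) % 2 = 0 := by have := Nat.odd_iff.mp ho; omega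
      simp [h0, h1]

theorem bfold (s : List Int) (k : Nat) (par : Int) (hpar : par = 0 ∨ par = 1)
    (l0 r0 : List Int) :
    (PySem.List.enumerate s (k : Int)).foldl
      (fun (lr : List Int × List Int) iv =>
        if iv.1 % 2 = par then (lr.1 ++ [iv.2], lr.2) else (lr.1, lr.2 ++ [iv.2]))
      (l0, r0) =
    (if (k : Int) % 2 = par then (l0 ++ (parSplit s).1, r0 ++ (parSplit s).2)
     else (l0 ++ (parSplit s).2, r0 ++ (parSplit s).1)) := by
  induction s generalizing k l0 r0 with
  | nil => simp [PySem.List.enumerate_nil, parSplit]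
  | cons v t ih =>
    rw [PySem.List.enumerate_cons, List.foldl_cons]
    have hkk : ((k : Int) + 1) = ((k + 1 : Nat) : Int) := by push_cast; ring
    by_cases hk : (k : Int) % 2 = par
    · have hk1 : ¬ (((k + 1 : Nat) : Int) % 2 = par) := by push_cast; omega
      simp only [hk, if_true]
      rw [hkk, ih (k+1) (l0 ++ [v]) r0, if_neg hk1]
      simp [parSplit]
    · have hk1 : (((k + 1 : Nat) : Int) % 2 = par) := by push_cast; omega
      simp only [hk, if_false]
      rw [hkk, ih (k+1) l0 (r0 ++ [v]), if_pos hk1]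
      simp [parSplit]

theorem loopAP (L : List Int) (f g : Int → Int) (r temp : List Int)
    (h : 2 * L.length ≤ temp.length) :
    (L.foldl (fun (st : List Int × List Int) i =>
        let ml := max_element st.2
        let r1 := st.1.set (f i).toNat ml.1
        let t1 := st.2.eraseIdx ml.2.toNat
        let mr := max_element t1
        let r2 := r1.set (g i).toNat mr.1
        let t2 := t1.eraseIdx mr.2.toNat
        (r2, t2)) (r, temp)).1 =
    (L.foldl (fun (st : List Int × List Int) i =>
        match st.2 with
        | a :: b :: rest => ((st.1.set (f i).toNat a).set (g i).toNat b, rest)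
        | _ => st) (r, selAll temp)).1 := by
  induction L generalizing r temp with
  | nil => simp
  | cons i L ih =>
    simp only [List.foldl_cons]
    have hcons : 2 * (L.length + 1) ≤ temp.length := by
      simpa [List.length_cons, Nat.mul_add] using h
    have htne : temp ≠ [] := by
      intro hh; rw [hh] at hcons; simp at hcons
    have h1lt := max_element_idx_lt temp htne
    have hlen1 : (temp.eraseIdx (max_element temp).2.toNat).length = temp.length - 1 := by
      rw [List.length_eraseIdx, if_pos h1lt]
    have ht1ne : temp.eraseIdx (max_element temp).2.toNat ≠ [] := by
      intro hh
      have := congrArg List.length hh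
      simp [hlen1] at this
      omega
    set t1 := temp.eraseIdx (max_element temp).2.toNat with ht1
    have h2lt := max_element_idx_lt t1 ht1ne
    have hlen2 : (t1.eraseIdx (max_element t1).2.toNat).length = t1.length - 1 := by
      rw [List.length_eraseIdx, if_pos h2lt]
    rw [selAll_cons temp htne, selAll_cons t1 ht1ne]
    simp only []
    rw [ih]
    omega

theorem set_at_prefix (p s : List Int) (x a : Int) (n : Nat) (hn : n = p.length) :
    (p ++ x :: s).set n a = p ++ a :: s := by
  subst hn
  rw [List.set_append, if_neg (by omega)]
  simp

theorem take_two_more (l : List Int) (n : Nat) (h : n + 2 ≤ l.length) :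
    l.take (n + 2) = l.take n ++ [l[n]'(by omega), l[n+1]'(by omega)] := by
  rw [show n + 2 = (n + 1) + 1 from rfl, List.take_add_one, List.take_add_one]
  rw [List.getElem?_eq_getElem (by omega), List.getElem?_eq_getElem (by omega)]
  simp only [Option.toList_some, List.append_assoc]
  rfl

theorem drop_two_cons (l : List Int) (n : Nat) (h : n + 2 ≤ l.length) :
    l.drop n = l[n]'(by omega) :: l[n+1]'(by omega) :: l.drop (n + 2) := by
  rw [show n + 2 = (n + 1) + 1 from rfl]
  rw [List.getElem_cons_drop (by omega), List.getElem_cons_drop (by omega)]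

theorem set_left_block (u : Nat) (mid : List Int) (a : Int) :
    (List.replicate (u + 1) (0:Int) ++ mid).set u a =
      List.replicate u 0 ++ a :: mid := by
  rw [List.replicate_succ', List.append_assoc]
  exact set_at_prefix _ _ _ _ _ (by simp)

theorem set_right_block (u v : Nat) (mid : List Int) (a b : Int) (n : Nat)
    (hn : n = u + 1 + mid.length) :
    (List.replicate u (0:Int) ++ a :: (mid ++ List.replicate (v + 1) 0)).set n b =
      List.replicate u 0 ++ a :: (mid ++ b :: List.replicate v 0) := by
  rw [List.replicate_succ]
  rw [show List.replicate u (0:Int) ++ a :: (mid ++ (0:Int) :: List.replicate v 0)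
        = (List.replicate u (0:Int) ++ a :: mid) ++ (0:Int) :: List.replicate v 0 from by simp]
  rw [set_at_prefix _ _ _ _ _ (by simp; omega)]
  simp

theorem oddLoop (s0 : Int) (srest : List Int) (k : Nat) (hlen : srest.length = 2 * k)
    (t : Nat) (ht : t ≤ k) :
    (PySem.List.pyRange 1 ((t : Int) + 1)).foldl
      (fun (st : List Int × List Int) i =>
        match st.2 with
        | a :: b :: rest => ((st.1.set ((k : Int) - i).toNat a).set ((k : Int) + i).toNat b, rest)
        | _ => st)
      (List.replicate k 0 ++ s0 :: List.replicate k 0, srest) =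
    (List.replicate (k - t) 0 ++
      ((parSplit (s0 :: srest.take (2 * t))).2.reverse ++ (parSplit (s0 :: srest.take (2 * t))).1) ++
      List.replicate (k - t) 0, srest.drop (2 * t)) := by
  induction t with
  | zero =>
    rw [show ((0 : Nat) : Int) + 1 = 1 by simp, PySem.List.pyRange_one_eq_nil le_rfl]
    simp [parSplit]
  | succ t ih =>
    have ht' : t ≤ k := by omega
    have hrange : PySem.List.pyRange 1 (((t + 1 : Nat) : Int) + 1) =
        PySem.List.pyRange 1 ((t : Int) + 1) ++ [(t : Int) + 1] := by
      push_cast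
      exact PySem.List.pyRange_one_succ_right (by omega)
    rw [hrange, List.foldl_append, ih ht']
    simp only [List.foldl_cons, List.foldl_nil]
    have hb : 2 * t + 2 ≤ srest.length := by omega
    have hdropc : srest.drop (2*t) =
        srest[2*t]'(by omega) :: srest[2*t+1]'(by omega) :: srest.drop (2*t+2) :=
      drop_two_cons srest (2*t) hb
    rw [hdropc]
    simp only []
    have hi1 : ((k : Int) - ((t : Int) + 1)).toNat = k - (t+1) := by omega
    have hi2 : ((k : Int) + ((t : Int) + 1)).toNat = k + t + 1 := by omega
    rw [hi1, hi2]
    set u := k - (t+1) with hu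
    have hkt : k - t = u + 1 := by omega
    rw [hkt]
    set m := s0 :: srest.take (2*t) with hm
    set E := (parSplit m).1 with hE
    set O := (parSplit m).2 with hO
    have hmlen : m.length = 2 * t + 1 := by
      simp only [hm, List.length_cons, List.length_take]
      omega
    have hmid : (O.reverse ++ E).length = 2 * t + 1 := by
      have h1 := parSplit_len m
      rw [← hE, ← hO] at h1
      simp only [List.length_append, List.length_reverse]
      omega
    rw [show List.replicate (u + 1) (0:Int) ++ (O.reverse ++ E) ++ List.replicate (u + 1) 0
          = List.replicate (u + 1) (0:Int) ++ ((O.reverse ++ E) ++ List.replicate (u + 1) 0) from by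
        simp [List.append_assoc]]
    rw [set_left_block]
    rw [set_right_block u u _ _ _ _ (by rw [hmid]; omega)]
    have htake : srest.take (2 * (t+1)) = srest.take (2*t) ++ [srest[2*t]'(by omega), srest[2*t+1]'(by omega)] := by
      rw [show 2 * (t+1) = 2*t + 2 from by ring]
      exact take_two_more srest (2*t) hb
    have hm' : (s0 :: srest.take (2 * (t+1))) = m ++ [srest[2*t]'(by omega), srest[2*t+1]'(by omega)] := by
      rw [htake, hm]
      simp
    rw [hm', parSplit_append2, if_neg (by rw [hmlen]; omega)]
    have hdrop : srest.drop (2 * (t+1)) = srest.drop (2*t+2) := by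
      rw [show 2 * (t+1) = 2*t + 2 from by ring]
    rw [hdrop]
    refine Prod.ext ?_ rfl
    simp only [← hE, ← hO, List.reverse_append, List.reverse_cons, List.reverse_nil,
      List.nil_append, List.cons_append, List.append_assoc]

theorem evenLoop (s : List Int) (k : Nat) (hlen : s.length = 2 * k)
    (t : Nat) (ht : t ≤ k) :
    (PySem.List.pyRange 0 (t : Int)).foldl
      (fun (st : List Int × List Int) i =>
        match st.2 with
        | a :: b :: rest => ((st.1.set ((k : Int) - 1 - i).toNat a).set ((k : Int) + i).toNat b, rest)
        | _ => st)
      (List.replicate (2 * k) 0, s) =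
    (List.replicate (k - t) 0 ++
      ((parSplit (s.take (2 * t))).1.reverse ++ (parSplit (s.take (2 * t))).2) ++
      List.replicate (k - t) 0, s.drop (2 * t)) := by
  induction t with
  | zero =>
    rw [show ((0 : Nat) : Int) = 0 by simp, PySem.List.pyRange_one_eq_nil le_rfl]
    simp only [List.foldl_nil, Nat.mul_zero, List.take_zero, List.drop_zero, Nat.sub_zero]
    rw [show parSplit [] = ([], []) from rfl]
    simp only [List.reverse_nil, List.append_nil]
    rw [show 2 * k = k + k from by ring, List.replicate_add]
  | succ t ih =>
    have ht' : t ≤ k := by omega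
    have hrange : PySem.List.pyRange 0 ((t + 1 : Nat) : Int) =
        PySem.List.pyRange 0 (t : Int) ++ [(t : Int)] := by
      push_cast
      exact PySem.List.pyRange_one_succ_right (by omega)
    rw [hrange, List.foldl_append, ih ht']
    simp only [List.foldl_cons, List.foldl_nil]
    have hb : 2 * t + 2 ≤ s.length := by omega
    have hdropc : s.drop (2*t) =
        s[2*t]'(by omega) :: s[2*t+1]'(by omega) :: s.drop (2*t+2) :=
      drop_two_cons s (2*t) hb
    rw [hdropc]
    simp only []
    have hi1 : ((k : Int) - 1 - (t : Int)).toNat = k - (t+1) := by omega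
    have hi2 : ((k : Int) + (t : Int)).toNat = k + t := by omega
    rw [hi1, hi2]
    set u := k - (t+1) with hu
    have hkt : k - t = u + 1 := by omega
    rw [hkt]
    set m := s.take (2*t) with hm
    set E := (parSplit m).1 with hE
    set O := (parSplit m).2 with hO
    have hmlen : m.length = 2 * t := by
      simp only [hm, List.length_take]
      omega
    have hmid : (E.reverse ++ O).length = 2 * t := by
      have h1 := parSplit_len m
      rw [← hE, ← hO] at h1
      simp only [List.length_append, List.length_reverse]
      omega
    rw [show List.replicate (u + 1) (0:Int) ++ (E.reverse ++ O) ++ List.replicate (u + 1) 0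
          = List.replicate (u + 1) (0:Int) ++ ((E.reverse ++ O) ++ List.replicate (u + 1) 0) from by
        simp [List.append_assoc]]
    rw [set_left_block]
    rw [set_right_block u u _ _ _ _ (by rw [hmid]; omega)]
    have htake : s.take (2 * (t+1)) = s.take (2*t) ++ [s[2*t]'(by omega), s[2*t+1]'(by omega)] := by
      rw [show 2 * (t+1) = 2*t + 2 from by ring]
      exact take_two_more s (2*t) hb
    rw [show s.take (2 * (t+1)) = m ++ [s[2*t]'(by omega), s[2*t+1]'(by omega)] from htake]
    rw [parSplit_append2, if_pos (by rw [hmlen]; omega)]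
    have hdrop : s.drop (2 * (t+1)) = s.drop (2*t+2) := by
      rw [show 2 * (t+1) = 2*t + 2 from by ring]
    rw [hdrop]
    refine Prod.ext ?_ rfl
    simp only [← hE, ← hO, List.reverse_append, List.reverse_cons, List.reverse_nil,
      List.nil_append, List.cons_append, List.append_assoc]

theorem alt_eq (arr : List Int) :
    sort_max_center_alt arr =
      (if ((0:Nat) : Int) % 2 = (arr.length : Int) % 2
        then ((parSplit (selAll arr)).1.reverse ++ (parSplit (selAll arr)).2)
        else ((parSplit (selAll arr)).2.reverse ++ (parSplit (selAll arr)).1)) := by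
  simp only [sort_max_center_alt]
  rw [← selAll_eq_sorted]
  rw [show (0 : Int) = ((0:Nat) : Int) from by simp]
  rw [bfold (selAll arr) 0 ((arr.length : Int) % 2) (by omega) [] []]
  by_cases h : ((0:Nat) : Int) % 2 = (arr.length : Int) % 2
  · rw [if_pos h, if_pos h]
    simp
  · rw [if_neg h, if_neg h]
    simp

theorem replicate_center (k : Nat) (a : Int) :
    (List.replicate (2 * k + 1) (0:Int)).set k a =
      List.replicate k 0 ++ a :: List.replicate k 0 := by
  rw [show 2 * k + 1 = k + (k + 1) from by ring, List.replicate_add, List.replicate_succ]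
  exact set_at_prefix _ _ _ _ _ (by simp)

-- ===== VERDICT (by name: the statement is the Claim_ definition above) =====
theorem sort_max_center_spec : Claim_equal_sort_max_center := by
  intro arr _
  unfold Spec_sort_max_center
  by_cases hodd : arr.length % 2 = 1
  · -- odd length
    set n := arr.length with hn
    set k := n / 2 with hk
    have hn2 : n = 2 * k + 1 := by omega
    have hane : arr ≠ [] := by
      intro h; rw [h] at hn; simp [hn] at hn2
    have hc : ((n : Int) / 2) = (k : Int) := by omega
    have htemp0 : arr.foldl (fun t el => t ++ [el]) [] = arr := by
      rw [pv_foldl_app]; simp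
    simp only [sort_max_center]
    rw [if_pos hodd, htemp0]
    rw [hc]
    simp only [Int.toNat_natCast]
    have hel := max_element_idx_lt arr hane
    have hlen1 : (arr.eraseIdx (max_element arr).2.toNat).length = n - 1 := by
      rw [List.length_eraseIdx, if_pos hel]
    have hA := loopAP (PySem.List.pyRange 1 ((k:Int)+1))
      (fun i => (k:Int) - i) (fun i => (k:Int) + i)
      ((List.replicate n 0).set k (max_element arr).1)
      (arr.eraseIdx (max_element arr).2.toNat)
      (by rw [PySem.List.length_pyRange_one]; omega)
    simp only [] at hA
    rw [hA]
    have hslen : (selAll (arr.eraseIdx (max_element arr).2.toNat)).length = 2 * k := by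
      rw [selAll_length]; omega
    rw [show List.replicate n (0:Int) = List.replicate (2*k+1) 0 from by rw [hn2]]
    rw [replicate_center k (max_element arr).1]
    rw [oddLoop (max_element arr).1 (selAll (arr.eraseIdx (max_element arr).2.toNat)) k hslen k le_rfl]
    rw [alt_eq arr]
    rw [if_neg (by push_cast; omega)]
    rw [show (2*k : Nat) = (selAll (arr.eraseIdx (max_element arr).2.toNat)).length from hslen.symm,
      List.take_length]
    rw [← selAll_cons arr hane]
    simp
  · -- even length
    set n := arr.length with hn
    set k := n / 2 with hk
    have hn2 : n = 2 * k := by omega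
    have hc : ((n : Int) / 2) = (k : Int) := by omega
    have htemp0 : arr.foldl (fun t el => t ++ [el]) [] = arr := by
      rw [pv_foldl_app]; simp
    simp only [sort_max_center]
    rw [if_neg hodd, htemp0]
    rw [hc]
    have hA := loopAP (PySem.List.pyRange 0 (k:Int))
      (fun i => (k:Int) - 1 - i) (fun i => (k:Int) + i)
      (List.replicate n 0) arr
      (by rw [PySem.List.length_pyRange_one]; omega)
    simp only [] at hA
    rw [hA]
    have hslen : (selAll arr).length = 2 * k := by
      rw [selAll_length]; omega
    rw [show List.replicate n (0:Int) = List.replicate (2*k) 0 from by rw [hn2]]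
    rw [evenLoop (selAll arr) k hslen k le_rfl]
    rw [alt_eq arr]
    rw [if_pos (by push_cast; omega)]
    rw [show (2*k : Nat) = (selAll arr).length from hslen.symm, List.take_length]
    simp
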